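-- pv_equiv track=rewrite | github.com/tangba484/1_study | out/production/Algorithm/무인도 여행.py | solution
-- ===== SOURCE A (Python) =====
-- from collections import deque
--
-- def solution(maps):
--     graph,result=[],[]
--     for i in maps:
--         graph.append(list(i))
--     rl,cl = len(graph),len(graph[0])
--     visited=[[0 for _ in range(cl)]for _ in range(rl)]
--     def bfs(q):
--         dx,dy=[-1,1,0,0],[0,0,-1,1]
--         s=int(graph[q[0][0]][q[0][1]])
--         while q:
--             x,y = q.popleft()
--             for i in range(4):
--                 DX,DY = x+dx[i],y+dy[i]
--                 if 0<=DX<rl and 0<= DY <cl :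
--                     if not visited[DX][DY] and graph[DX][DY] != "X":
--                         visited[DX][DY] = 1
--                         s += int(graph[DX][DY])
--                         q.append([DX,DY])
--         return result.append(s)
--     for i in range(rl):
--         for j in range(cl):
--             if graph[i][j] != "X" and not visited[i][j]:
--                 q = deque([[i,j]])
--                 visited[i][j] = 1
--                 bfs(q)
--     if len(result) == 0:
--         return [-1]
--     else:
--         return sorted(result)
-- ===== SOURCE B (Python) =====
-- def solution(maps):
--     rl, cl = len(maps), len(maps[0])
--     visited = [[False] * cl for _ in range(rl)]
--
--     def dfs(x, y):
--         visited[x][y] = True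
--         total = int(maps[x][y])
--         for nx, ny in ((x - 1, y), (x + 1, y), (x, y - 1), (x, y + 1)):
--             if 0 <= nx < rl and 0 <= ny < cl and not visited[nx][ny] and maps[nx][ny] != 'X':
--                 total += dfs(nx, ny)
--         return total
--
--     result = [dfs(i, j) for i in range(rl) for j in range(cl)
--               if maps[i][j] != 'X' and not visited[i][j]]
--     return sorted(result) if result else [-1]
-- ===== Notes on version B (the rewrite author's own statement) =====
-- stated objective: simpler
-- what changed: Replaces the deque-based BFS flood fill with shared mutable grid/visited matrices by a recursive DFS helper that returns each component's digit sum directly, collected by a comprehension.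
import Mathlib
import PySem

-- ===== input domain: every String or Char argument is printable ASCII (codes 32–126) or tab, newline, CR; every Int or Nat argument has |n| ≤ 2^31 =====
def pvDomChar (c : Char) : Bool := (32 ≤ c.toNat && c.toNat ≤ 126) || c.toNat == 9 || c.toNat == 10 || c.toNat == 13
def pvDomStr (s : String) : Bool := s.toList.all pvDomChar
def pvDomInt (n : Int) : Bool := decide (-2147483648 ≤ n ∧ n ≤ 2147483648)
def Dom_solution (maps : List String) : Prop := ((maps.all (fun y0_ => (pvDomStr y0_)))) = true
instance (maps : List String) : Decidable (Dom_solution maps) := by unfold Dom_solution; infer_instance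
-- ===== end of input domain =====

-- B replaces A's deque-based BFS flood fill by a recursive DFS helper that returns each
-- component's digit sum directly (objective: simpler); same return value on every input A accepts.

-- ===== PORT A =====
-- grid cell access; used only under the ports' 0 ≤ i < rl, 0 ≤ j < cl guards, where it is
-- exact Python indexing (ragged rows that would raise IndexError are excluded by Pre_).
def cellAt (g : List (List Char)) (i j : Int) : Char := (g.getD i.toNat []).getD j.toNat 'X'

-- int(c) for an ASCII digit character c (Pre_ guarantees every non-'X' cell is a digit; exact there)
def digitVal (c : Char) : Int := (c.toNat : Int) - 48

-- the dx/dy direction table of both Pythons, in their shared order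
def pvDirs : List (Int × Int) := [(-1, 0), (1, 0), (0, -1), (0, 1)]

-- one iteration of the `for i in range(4)` body of A's bfs, acting on (queue-after-pop, visited, s);
-- the 0/1 `visited` matrix is represented as the set of its marked cells
def bfsStepF (g : List (List Char)) (rl cl x y : Int)
    (st : List (Int × Int) × Finset (Int × Int) × Int) (d : Int × Int) :
    List (Int × Int) × Finset (Int × Int) × Int :=
  if 0 ≤ x + d.1 ∧ x + d.1 < rl ∧ 0 ≤ y + d.2 ∧ y + d.2 < cl then
    if (x + d.1, y + d.2) ∉ st.2.1 ∧ cellAt g (x + d.1) (y + d.2) ≠ 'X' then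
      (st.1 ++ [(x + d.1, y + d.2)], insert (x + d.1, y + d.2) st.2.1,
        st.2.2 + digitVal (cellAt g (x + d.1) (y + d.2)))
    else st
  else st

-- the while-loop of A's bfs; fuel only totalises the recursion (never exhausted for the fuel the port passes)
def bfsLoop (g : List (List Char)) (rl cl : Int) :
    Nat → List (Int × Int) → Finset (Int × Int) → Int → Finset (Int × Int) × Int
  | 0, _, vis, s => (vis, s)
  | _ + 1, [], vis, s => (vis, s)
  | fuel + 1, (x, y) :: q, vis, s =>
      let st := pvDirs.foldl (bfsStepF g rl cl x y) (q, vis, s)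
      bfsLoop g rl cl fuel st.1 st.2.1 st.2.2

-- A's bfs: read s = int(graph[q[0][0]][q[0][1]]) from the queue front, run the while loop, return s
def bfsA (g : List (List Char)) (rl cl : Int) (fuel : Nat)
    (q : List (Int × Int)) (vis : Finset (Int × Int)) : Finset (Int × Int) × Int :=
  bfsLoop g rl cl fuel q vis (digitVal (cellAt g (q.headD (0, 0)).1 (q.headD (0, 0)).2))

def solution (maps : List String) : List Int :=
  let graph := maps.map (·.toList)
  let rl : Int := graph.length
  let cl : Int := ((graph.getD 0 []).length : Int)
  let st := (PySem.List.pyRange 0 rl 1).foldl (fun st i =>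
      (PySem.List.pyRange 0 cl 1).foldl
        (fun (st : Finset (Int × Int) × List Int) j =>
          if cellAt graph i j ≠ 'X' ∧ (i, j) ∉ st.1 then
            let r := bfsA graph rl cl (2 * (rl * cl).toNat + 2) [(i, j)] (insert (i, j) st.1)
            (r.1, st.2 ++ [r.2])
          else st) st)
    ((∅ : Finset (Int × Int)), ([] : List Int))
  if st.2.length = 0 then [-1] else PySem.List.sorted st.2 (fun x => x) false

-- ===== PORT B =====
-- B's recursive dfs(x, y): mark (x, y), take its digit, add the totals of the recursive calls
-- on unvisited in-bounds non-'X' neighbours; returns (visited, total)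
def dfsB (g : List (List Char)) (rl cl : Int) :
    Nat → Int → Int → Finset (Int × Int) → Finset (Int × Int) × Int
  | 0, _, _, vis => (vis, 0)
  | fuel + 1, x, y, vis =>
      pvDirs.foldl
        (fun (st : Finset (Int × Int) × Int) d =>
          if (0 ≤ x + d.1 ∧ x + d.1 < rl ∧ 0 ≤ y + d.2 ∧ y + d.2 < cl) ∧
              (x + d.1, y + d.2) ∉ st.1 ∧ cellAt g (x + d.1) (y + d.2) ≠ 'X' then
            let r := dfsB g rl cl fuel (x + d.1) (y + d.2) st.1
            (r.1, st.2 + r.2)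
          else st)
        (insert (x, y) vis, digitVal (cellAt g x y))

def solution_alt (maps : List String) : List Int :=
  let g := maps.map (·.toList)
  let rl : Int := g.length
  let cl : Int := ((g.getD 0 []).length : Int)
  let st := (PySem.List.pyRange 0 rl 1).foldl (fun st i =>
      (PySem.List.pyRange 0 cl 1).foldl
        (fun (st : Finset (Int × Int) × List Int) j =>
          if cellAt g i j ≠ 'X' ∧ (i, j) ∉ st.1 then
            let r := dfsB g rl cl ((rl * cl).toNat + 1) i j st.1
            (r.1, st.2 ++ [r.2])
          else st) st)
    ((∅ : Finset (Int × Int)), ([] : List Int))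
  if st.2 = [] then [-1] else PySem.List.sorted st.2 (fun x => x) false

-- ===== PRECONDITION & SPEC =====
-- Pre_ is exactly where the Python A returns: maps nonempty (else len(graph[0]) raises IndexError),
-- every row at least as long as the first (else IndexError), and every cell in the first
-- len(maps[0]) columns a digit or 'X' (else int(...) raises ValueError).
def Pre_solution (maps : List String) : Prop :=
  maps ≠ [] ∧ (maps.all (fun s =>
    decide ((maps.headD "").toList.length ≤ s.toList.length) &&
    (s.toList.take (maps.headD "").toList.length).all
      (fun c => c == 'X' || (decide (48 ≤ c.toNat) && decide (c.toNat ≤ 57))))) = true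
instance (maps : List String) : Decidable (Pre_solution maps) := by unfold Pre_solution; infer_instance
def pvWitness_solution : List String := ["1X0", "X23"]

def Spec_solution (maps : List String) (out : List Int) : Prop := out = solution_alt maps
instance (maps : List String) (out : List Int) : Decidable (Spec_solution maps out) := by unfold Spec_solution; infer_instance

-- ===== CLAIM (what is proved, stated in full; the proofs are below) =====
def Claim_equal_solution : Prop := ∀ (maps : List String), Dom_solution maps → Pre_solution maps → Spec_solution maps (solution maps)

-- ===== LEMMAS AND PROOFS =====

-- abstract layer: land cells, the neighbour relation, reachability avoiding a visited set
def Land (g : List (List Char)) (rl cl : Int) (p : Int × Int) : Prop :=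
  0 ≤ p.1 ∧ p.1 < rl ∧ 0 ≤ p.2 ∧ p.2 < cl ∧ cellAt g p.1 p.2 ≠ 'X'

def Adjp (a b : Int × Int) : Prop := ∃ d ∈ pvDirs, b = (a.1 + d.1, a.2 + d.2)

def Stepp (g : List (List Char)) (rl cl : Int) (V : Finset (Int × Int)) (a b : Int × Int) : Prop :=
  Adjp a b ∧ Land g rl cl b ∧ b ∉ V

def Reach (g : List (List Char)) (rl cl : Int) (V : Finset (Int × Int)) (p q : Int × Int) : Prop :=
  Relation.ReflTransGen (Stepp g rl cl V) p q

def Box (rl cl : Int) : Finset (Int × Int) :=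
  (Finset.range rl.toNat ×ˢ Finset.range cl.toNat).image (fun p => ((p.1 : Int), (p.2 : Int)))

theorem mem_box (rl cl : Int) (p : Int × Int) :
    p ∈ Box rl cl ↔ 0 ≤ p.1 ∧ p.1 < rl ∧ 0 ≤ p.2 ∧ p.2 < cl := by
  simp only [Box, Finset.mem_image, Finset.mem_product, Finset.mem_range]
  constructor
  · rintro ⟨⟨a, b⟩, ⟨ha, hb⟩, rfl⟩
    simp only []
    omega
  · rintro ⟨h1, h2, h3, h4⟩
    exact ⟨(p.1.toNat, p.2.toNat), ⟨by omega, by omega⟩,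
      by rw [Int.toNat_of_nonneg h1, Int.toNat_of_nonneg h3]⟩

theorem card_box (rl cl : Int) : (Box rl cl).card = rl.toNat * cl.toNat := by
  rw [Box, Finset.card_image_of_injective _ (by intro a b h; simp only [Prod.mk.injEq, Int.natCast_inj] at h; exact Prod.ext h.1 h.2),
    Finset.card_product, Finset.card_range, Finset.card_range]

def valAt (g : List (List Char)) (p : Int × Int) : Int := digitVal (cellAt g p.1 p.2)

-- the set a traversal started at p over base visited set V must produce
def CompSet (g : List (List Char)) (rl cl : Int) (V : Finset (Int × Int)) (p : Int × Int)
    (M : Finset (Int × Int)) : Prop :=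
  p ∈ M ∧ (∀ a ∈ M, a ∉ V) ∧ (∀ a ∈ M, Reach g rl cl V p a) ∧ (∀ a ∈ M, Land g rl cl a) ∧
    ∀ a ∈ M, ∀ b, Stepp g rl cl V a b → b ∈ M

theorem land_mem_box (g : List (List Char)) (rl cl : Int) (p : Int × Int)
    (h : Land g rl cl p) : p ∈ Box rl cl := by
  obtain ⟨h1, h2, h3, h4, _⟩ := h
  rw [mem_box]; exact ⟨h1, h2, h3, h4⟩

theorem reach_mono (g : List (List Char)) (rl cl : Int) (V V' : Finset (Int × Int))
    (hVV : V ⊆ V') (p q : Int × Int) (h : Reach g rl cl V' p q) : Reach g rl cl V p q := by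
  refine Relation.ReflTransGen.mono ?_ h
  rintro a b ⟨hadj, hland, hb⟩
  exact ⟨hadj, hland, fun hbV => hb (hVV hbV)⟩

theorem reach_subset (g : List (List Char)) (rl cl : Int) (V : Finset (Int × Int))
    (p : Int × Int) (M : Finset (Int × Int)) (hM : CompSet g rl cl V p M) :
    ∀ q, Reach g rl cl V p q → q ∈ M := by
  intro q hq
  induction hq with
  | refl => exact hM.1
  | tail _ hstep ih => exact hM.2.2.2.2 _ ih _ hstep

theorem compset_unique (g : List (List Char)) (rl cl : Int) (V : Finset (Int × Int))
    (p : Int × Int) (M1 M2 : Finset (Int × Int))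
    (h1 : CompSet g rl cl V p M1) (h2 : CompSet g rl cl V p M2) : M1 = M2 := by
  apply Finset.ext
  intro a
  constructor
  · intro ha; exact reach_subset g rl cl V p M2 h2 a (h1.2.2.1 a ha)
  · intro ha; exact reach_subset g rl cl V p M1 h1 a (h2.2.2.1 a ha)

-- the BFS loop invariant; ex is the element popped but not fully expanded yet
structure BfsInv (g : List (List Char)) (rl cl : Int) (V : Finset (Int × Int)) (p : Int × Int)
    (ex : List (Int × Int)) (q : List (Int × Int)) (vis : Finset (Int × Int)) (s : Int) : Prop where
  subV : V ⊆ vis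
  pmem : p ∈ vis
  pnotV : p ∉ V
  qmem : ∀ a ∈ q, a ∈ vis ∧ a ∉ V
  reach : ∀ a ∈ vis, a ∉ V → Reach g rl cl V p a
  land : ∀ a ∈ vis, a ∉ V → Land g rl cl a
  sumv : s = ∑ a ∈ vis \ V, valAt g a
  closure : ∀ a ∈ vis, a ∉ V → ∀ b, Stepp g rl cl V a b → b ∈ vis ∨ a ∈ q ∨ a ∈ ex

theorem bfs_fold (g : List (List Char)) (rl cl : Int) (V : Finset (Int × Int)) (p : Int × Int)
    (x y : Int) (hxyV : (x, y) ∉ V) :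
    ∀ (L : List (Int × Int)), (∀ d ∈ L, d ∈ pvDirs) →
      ∀ (t : List (Int × Int) × Finset (Int × Int) × Int),
        (x, y) ∈ t.2.1 →
        BfsInv g rl cl V p [(x, y)] t.1 t.2.1 t.2.2 →
        BfsInv g rl cl V p [(x, y)] (L.foldl (bfsStepF g rl cl x y) t).1
            (L.foldl (bfsStepF g rl cl x y) t).2.1 (L.foldl (bfsStepF g rl cl x y) t).2.2 ∧
          t.2.1 ⊆ (L.foldl (bfsStepF g rl cl x y) t).2.1 ∧
          (L.foldl (bfsStepF g rl cl x y) t).1.length +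
              2 * ((Box rl cl) \ (L.foldl (bfsStepF g rl cl x y) t).2.1).card ≤
            t.1.length + 2 * ((Box rl cl) \ t.2.1).card ∧
          ∀ d ∈ L, Stepp g rl cl V (x, y) (x + d.1, y + d.2) →
            (x + d.1, y + d.2) ∈ (L.foldl (bfsStepF g rl cl x y) t).2.1 := by
  intro L
  induction L with
  | nil =>
    intro _ t hxy hI
    exact ⟨hI, Finset.Subset.refl _, le_refl _, by simp⟩
  | cons d L ih =>
    rintro hL ⟨q, vis, s⟩ hxy hI
    have hd : d ∈ pvDirs := hL d List.mem_cons_self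
    have hL' : ∀ d' ∈ L, d' ∈ pvDirs := fun d' hd' => hL d' (List.mem_cons_of_mem _ hd')
    rw [List.foldl_cons]
    have hI' : BfsInv g rl cl V p [(x, y)] q vis s := hI
    have hxy' : (x, y) ∈ vis := hxy
    have hstep :
        BfsInv g rl cl V p [(x, y)] (bfsStepF g rl cl x y (q, vis, s) d).1
            (bfsStepF g rl cl x y (q, vis, s) d).2.1 (bfsStepF g rl cl x y (q, vis, s) d).2.2 ∧
          vis ⊆ (bfsStepF g rl cl x y (q, vis, s) d).2.1 ∧
          (bfsStepF g rl cl x y (q, vis, s) d).1.length +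
              2 * ((Box rl cl) \ (bfsStepF g rl cl x y (q, vis, s) d).2.1).card ≤
            q.length + 2 * ((Box rl cl) \ vis).card ∧
          (Stepp g rl cl V (x, y) (x + d.1, y + d.2) →
            (x + d.1, y + d.2) ∈ (bfsStepF g rl cl x y (q, vis, s) d).2.1) := by
      by_cases hb : 0 ≤ x + d.1 ∧ x + d.1 < rl ∧ 0 ≤ y + d.2 ∧ y + d.2 < cl
      · by_cases hv : (x + d.1, y + d.2) ∉ vis ∧ cellAt g (x + d.1) (y + d.2) ≠ 'X'
        · have hres : bfsStepF g rl cl x y (q, vis, s) d =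
              (q ++ [(x + d.1, y + d.2)], insert (x + d.1, y + d.2) vis,
                s + digitVal (cellAt g (x + d.1) (y + d.2))) := by
            unfold bfsStepF; rw [if_pos hb, if_pos hv]
          rw [hres]
          have hnV : (x + d.1, y + d.2) ∉ V := fun h => hv.1 (hI'.subV h)
          have hland : Land g rl cl (x + d.1, y + d.2) :=
            ⟨hb.1, hb.2.1, hb.2.2.1, hb.2.2.2, hv.2⟩
          have hreachn : Reach g rl cl V p (x + d.1, y + d.2) :=
            Relation.ReflTransGen.tail (hI'.reach (x, y) hxy' hxyV) ⟨⟨d, hd, rfl⟩, hland, hnV⟩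
          have hnbox : (x + d.1, y + d.2) ∈ (Box rl cl) \ vis :=
            Finset.mem_sdiff.2 ⟨land_mem_box g rl cl _ hland, hv.1⟩
          refine ⟨⟨hI'.subV.trans (Finset.subset_insert _ _),
              Finset.mem_insert_of_mem hI'.pmem, hI.pnotV, ?_, ?_, ?_, ?_, ?_⟩,
            Finset.subset_insert _ _, ?_, fun _ => Finset.mem_insert_self _ _⟩
          · intro a ha
            rcases List.mem_append.1 ha with ha | ha
            · exact ⟨Finset.mem_insert_of_mem (hI'.qmem a ha).1, (hI'.qmem a ha).2⟩
            · rcases List.mem_singleton.1 ha with rfl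
              exact ⟨Finset.mem_insert_self _ _, hnV⟩
          · intro a ha haV
            rcases Finset.mem_insert.1 ha with rfl | ha
            · exact hreachn
            · exact hI'.reach a ha haV
          · intro a ha haV
            rcases Finset.mem_insert.1 ha with rfl | ha
            · exact hland
            · exact hI'.land a ha haV
          · show s + digitVal (cellAt g (x + d.1) (y + d.2)) = _
            rw [Finset.insert_sdiff_of_notMem _ hnV,
              Finset.sum_insert (fun h => hv.1 (Finset.mem_sdiff.1 h).1), hI'.sumv]
            show _ = digitVal (cellAt g (x + d.1) (y + d.2)) + _
            ring
          · intro a ha haV b hstep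
            rcases Finset.mem_insert.1 ha with rfl | ha
            · exact Or.inr (Or.inl (List.mem_append_right _ (List.mem_singleton_self _)))
            · rcases hI'.closure a ha haV b hstep with hb' | hq' | hx'
              · exact Or.inl (Finset.mem_insert_of_mem hb')
              · exact Or.inr (Or.inl (List.mem_append_left _ hq'))
              · exact Or.inr (Or.inr hx')
          · show (q ++ [(x + d.1, y + d.2)]).length +
                2 * ((Box rl cl) \ insert (x + d.1, y + d.2) vis).card ≤ _
            rw [Finset.sdiff_insert, Finset.card_erase_of_mem hnbox, List.length_append]
            have hcard : 1 ≤ ((Box rl cl) \ vis).card := Finset.card_pos.2 ⟨_, hnbox⟩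
            simp only [List.length_singleton]
            omega
        · have hres : bfsStepF g rl cl x y (q, vis, s) d = (q, vis, s) := by
            unfold bfsStepF; rw [if_pos hb, if_neg hv]
          rw [hres]
          refine ⟨hI', Finset.Subset.refl _, le_refl _, ?_⟩
          rintro ⟨_, hland, _⟩
          rcases not_and_or.1 hv with h | h
          · exact not_not.1 h
          · exact absurd hland.2.2.2.2 h
      · have hres : bfsStepF g rl cl x y (q, vis, s) d = (q, vis, s) := by
          unfold bfsStepF; rw [if_neg hb]
        rw [hres]
        refine ⟨hI', Finset.Subset.refl _, le_refl _, ?_⟩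
        rintro ⟨_, hland, _⟩
        exact absurd ⟨hland.1, hland.2.1, hland.2.2.1, hland.2.2.2.1⟩ hb
    obtain ⟨hI1, hmono1, hm1, hh1⟩ := hstep
    obtain ⟨hI2, hmono2, hm2, hh2⟩ := ih hL' (bfsStepF g rl cl x y (q, vis, s) d) (hmono1 hxy') hI1
    refine ⟨hI2, hmono1.trans hmono2, le_trans hm2 hm1, ?_⟩
    intro d' hd' hstep'
    rcases List.mem_cons.1 hd' with rfl | hd'
    · exact hmono2 (hh1 hstep')
    · exact hh2 d' hd' hstep'

theorem bfs_run (g : List (List Char)) (rl cl : Int) (V : Finset (Int × Int)) (p : Int × Int) :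
    ∀ (fuel : Nat) (q : List (Int × Int)) (vis : Finset (Int × Int)) (s : Int),
      BfsInv g rl cl V p [] q vis s →
      q.length + 2 * ((Box rl cl) \ vis).card < fuel →
      ∃ M, bfsLoop g rl cl fuel q vis s = (V ∪ M, ∑ a ∈ M, valAt g a) ∧
        CompSet g rl cl V p M := by
  intro fuel
  induction fuel with
  | zero => intro q vis s _ h; exact absurd h (Nat.not_lt_zero _)
  | succ fuel ih =>
    rintro (_ | ⟨⟨x, y⟩, q⟩) vis s hI hfuel
    · refine ⟨vis \ V, ?_, ?_, ?_, ?_, ?_, ?_⟩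
      · show (vis, s) = _
        rw [Finset.union_sdiff_of_subset hI.subV, hI.sumv]
      · exact Finset.mem_sdiff.2 ⟨hI.pmem, hI.pnotV⟩
      · intro a ha; exact (Finset.mem_sdiff.1 ha).2
      · intro a ha; exact hI.reach a (Finset.mem_sdiff.1 ha).1 (Finset.mem_sdiff.1 ha).2
      · intro a ha; exact hI.land a (Finset.mem_sdiff.1 ha).1 (Finset.mem_sdiff.1 ha).2
      · intro a ha b hstep
        rcases hI.closure a (Finset.mem_sdiff.1 ha).1 (Finset.mem_sdiff.1 ha).2 b hstep with
          hb | hq | hq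
        · exact Finset.mem_sdiff.2 ⟨hb, hstep.2.2⟩
        · exact absurd hq (List.not_mem_nil)
        · exact absurd hq (List.not_mem_nil)
    · have hxy : (x, y) ∈ vis := (hI.qmem (x, y) List.mem_cons_self).1
      have hxyV : (x, y) ∉ V := (hI.qmem (x, y) List.mem_cons_self).2
      have hI0 : BfsInv g rl cl V p [(x, y)] q vis s :=
        ⟨hI.subV, hI.pmem, hI.pnotV, fun a ha => hI.qmem a (List.mem_cons_of_mem _ ha),
          hI.reach, hI.land, hI.sumv, by
            intro a ha haV b hstep
            rcases hI.closure a ha haV b hstep with hb | hq | hq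
            · exact Or.inl hb
            · rcases List.mem_cons.1 hq with rfl | hq
              · exact Or.inr (Or.inr (List.mem_singleton_self _))
              · exact Or.inr (Or.inl hq)
            · exact absurd hq (List.not_mem_nil)⟩
      obtain ⟨hIf, hmono, hmeas, hhand⟩ :=
        bfs_fold g rl cl V p x y hxyV pvDirs (fun d hd => hd) (q, vis, s) hxy hI0
      have hIe : BfsInv g rl cl V p []
          (pvDirs.foldl (bfsStepF g rl cl x y) (q, vis, s)).1
          (pvDirs.foldl (bfsStepF g rl cl x y) (q, vis, s)).2.1
          (pvDirs.foldl (bfsStepF g rl cl x y) (q, vis, s)).2.2 :=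
        ⟨hIf.subV, hIf.pmem, hIf.pnotV, hIf.qmem, hIf.reach, hIf.land, hIf.sumv, by
          intro a ha haV b hstep
          rcases hIf.closure a ha haV b hstep with hb | hq | hq
          · exact Or.inl hb
          · exact Or.inr (Or.inl hq)
          · rcases List.mem_singleton.1 hq with rfl
            obtain ⟨⟨d, hd, hb⟩, hland, hbV⟩ := hstep
            subst hb
            exact Or.inl (hhand d hd ⟨⟨d, hd, rfl⟩, hland, hbV⟩)⟩
      have hmeas' : (pvDirs.foldl (bfsStepF g rl cl x y) (q, vis, s)).1.length +
          2 * ((Box rl cl) \ (pvDirs.foldl (bfsStepF g rl cl x y) (q, vis, s)).2.1).card ≤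
          q.length + 2 * ((Box rl cl) \ vis).card := hmeas
      have hfuel' : (pvDirs.foldl (bfsStepF g rl cl x y) (q, vis, s)).1.length +
          2 * ((Box rl cl) \ (pvDirs.foldl (bfsStepF g rl cl x y) (q, vis, s)).2.1).card <
          fuel := by
        simp only [List.length_cons] at hfuel
        omega
      have hunf : bfsLoop g rl cl (fuel + 1) ((x, y) :: q) vis s =
          bfsLoop g rl cl fuel (pvDirs.foldl (bfsStepF g rl cl x y) (q, vis, s)).1
            (pvDirs.foldl (bfsStepF g rl cl x y) (q, vis, s)).2.1
            (pvDirs.foldl (bfsStepF g rl cl x y) (q, vis, s)).2.2 := rfl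
      rw [hunf]
      exact ih _ _ _ hIe hfuel'

-- the DFS partial-component predicate: closed except possibly at p itself
def DfsPart (g : List (List Char)) (rl cl : Int) (W : Finset (Int × Int)) (p : Int × Int)
    (M : Finset (Int × Int)) : Prop :=
  p ∈ M ∧ (∀ a ∈ M, a ∉ W) ∧ (∀ a ∈ M, Reach g rl cl W p a) ∧ (∀ a ∈ M, Land g rl cl a) ∧
    ∀ a ∈ M, a ≠ p → ∀ b, Stepp g rl cl W a b → b ∈ M

theorem dfs_fold (g : List (List Char)) (rl cl : Int) (fuel : Nat)
    (IH : ∀ (x y : Int) (W : Finset (Int × Int)),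
      Land g rl cl (x, y) → (x, y) ∉ W → ((Box rl cl) \ W).card < fuel →
      ∃ M, dfsB g rl cl fuel x y W = (W ∪ M, ∑ a ∈ M, valAt g a) ∧ CompSet g rl cl W (x, y) M)
    (W : Finset (Int × Int)) (x y : Int)
    (hxyL : Land g rl cl (x, y)) (hW : (x, y) ∉ W)
    (hcard : ((Box rl cl) \ W).card < fuel + 1) :
    ∀ (L : List (Int × Int)), (∀ d ∈ L, d ∈ pvDirs) →
      ∀ (st : Finset (Int × Int) × Int) (M : Finset (Int × Int)),
        st.1 = W ∪ M → st.2 = ∑ a ∈ M, valAt g a → DfsPart g rl cl W (x, y) M →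
        ∃ M', (L.foldl (fun (st : Finset (Int × Int) × Int) d =>
            if (0 ≤ x + d.1 ∧ x + d.1 < rl ∧ 0 ≤ y + d.2 ∧ y + d.2 < cl) ∧
                (x + d.1, y + d.2) ∉ st.1 ∧ cellAt g (x + d.1) (y + d.2) ≠ 'X' then
              let r := dfsB g rl cl fuel (x + d.1) (y + d.2) st.1
              (r.1, st.2 + r.2)
            else st) st) = (W ∪ M', ∑ a ∈ M', valAt g a) ∧
          DfsPart g rl cl W (x, y) M' ∧ M ⊆ M' ∧
          ∀ d ∈ L, Stepp g rl cl W (x, y) (x + d.1, y + d.2) → (x + d.1, y + d.2) ∈ W ∪ M' := by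
  intro L
  induction L with
  | nil =>
    intro _ st M hst1 hst2 hpart
    rw [List.foldl_nil]
    exact ⟨M, Prod.ext_iff.2 ⟨hst1, hst2⟩, hpart, Finset.Subset.refl _, by simp⟩
  | cons d L ih =>
    intro hL st M hst1 hst2 hpart
    have hd : d ∈ pvDirs := hL d List.mem_cons_self
    have hL' : ∀ d' ∈ L, d' ∈ pvDirs := fun d' hd' => hL d' (List.mem_cons_of_mem _ hd')
    rw [List.foldl_cons]
    by_cases hg : (0 ≤ x + d.1 ∧ x + d.1 < rl ∧ 0 ≤ y + d.2 ∧ y + d.2 < cl) ∧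
        (x + d.1, y + d.2) ∉ st.1 ∧ cellAt g (x + d.1) (y + d.2) ≠ 'X'
    · obtain ⟨hb, hnst, hX⟩ := hg
      have hland : Land g rl cl (x + d.1, y + d.2) := ⟨hb.1, hb.2.1, hb.2.2.1, hb.2.2.2, hX⟩
      have hnW : (x + d.1, y + d.2) ∉ W := fun h => hnst (hst1 ▸ Finset.mem_union_left _ h)
      have hxyst : (x, y) ∈ st.1 := hst1 ▸ Finset.mem_union_right _ hpart.1
      have hcard' : ((Box rl cl) \ st.1).card < fuel := by
        have hsub : (Box rl cl) \ st.1 ⊆ ((Box rl cl) \ W).erase (x, y) := by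
          intro a ha
          rcases Finset.mem_sdiff.1 ha with ⟨haB, hast⟩
          refine Finset.mem_erase.2 ⟨fun h => hast (h ▸ hxyst), Finset.mem_sdiff.2 ⟨haB, ?_⟩⟩
          exact fun h => hast (hst1 ▸ Finset.mem_union_left _ h)
        have := Finset.card_le_card hsub
        rw [Finset.card_erase_of_mem
          (Finset.mem_sdiff.2 ⟨land_mem_box g rl cl _ hxyL, hW⟩)] at this
        have hpos : 0 < ((Box rl cl) \ W).card :=
          Finset.card_pos.2 ⟨(x, y), Finset.mem_sdiff.2 ⟨land_mem_box g rl cl _ hxyL, hW⟩⟩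
        omega
      obtain ⟨Mn, hMn, hCn⟩ := IH (x + d.1) (y + d.2) st.1 hland hnst hcard'
      have hdisj : Disjoint M Mn := by
        rw [Finset.disjoint_left]
        intro a haM haMn
        exact hCn.2.1 a haMn (hst1 ▸ Finset.mem_union_right _ haM)
      have hstep1 : (if (0 ≤ x + d.1 ∧ x + d.1 < rl ∧ 0 ≤ y + d.2 ∧ y + d.2 < cl) ∧
            (x + d.1, y + d.2) ∉ st.1 ∧ cellAt g (x + d.1) (y + d.2) ≠ 'X' then
          let r := dfsB g rl cl fuel (x + d.1) (y + d.2) st.1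
          (r.1, st.2 + r.2)
          else st) = (W ∪ (M ∪ Mn), ∑ a ∈ M ∪ Mn, valAt g a) := by
        rw [if_pos ⟨hb, hnst, hX⟩]
        show ((dfsB g rl cl fuel (x + d.1) (y + d.2) st.1).1,
          st.2 + (dfsB g rl cl fuel (x + d.1) (y + d.2) st.1).2) = _
        rw [hMn]
        show (st.1 ∪ Mn, st.2 + ∑ a ∈ Mn, valAt g a) = _
        rw [hst1, hst2, Finset.union_assoc, Finset.sum_union hdisj]
      have hreachn : Reach g rl cl W (x, y) (x + d.1, y + d.2) :=
        Relation.ReflTransGen.single ⟨⟨d, hd, rfl⟩, hland, hnW⟩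
      have hpart' : DfsPart g rl cl W (x, y) (M ∪ Mn) := by
        refine ⟨Finset.mem_union_left _ hpart.1, ?_, ?_, ?_, ?_⟩
        · intro a ha
          rcases Finset.mem_union.1 ha with ha | ha
          · exact hpart.2.1 a ha
          · exact fun h => hCn.2.1 a ha (hst1 ▸ Finset.mem_union_left _ h)
        · intro a ha
          rcases Finset.mem_union.1 ha with ha | ha
          · exact hpart.2.2.1 a ha
          · exact hreachn.trans
              (reach_mono g rl cl W st.1 (hst1 ▸ Finset.subset_union_left) _ _ (hCn.2.2.1 a ha))
        · intro a ha
          rcases Finset.mem_union.1 ha with ha | ha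
          · exact hpart.2.2.2.1 a ha
          · exact hCn.2.2.2.1 a ha
        · intro a ha hne b hstep
          rcases Finset.mem_union.1 ha with ha | ha
          · exact Finset.mem_union_left _ (hpart.2.2.2.2 a ha hne b hstep)
          · by_cases hbst : b ∈ st.1
            · rcases Finset.mem_union.1 (hst1 ▸ hbst) with hbW | hbM
              · exact absurd hbW hstep.2.2
              · exact Finset.mem_union_left _ hbM
            · exact Finset.mem_union_right _
                (hCn.2.2.2.2 a ha b ⟨hstep.1, hstep.2.1, hbst⟩)
      obtain ⟨M', hfold, hpartf, hsubf, hhandf⟩ :=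
        ih hL' (W ∪ (M ∪ Mn), ∑ a ∈ M ∪ Mn, valAt g a) (M ∪ Mn) rfl rfl hpart'
      rw [hstep1]
      refine ⟨M', hfold, hpartf, (Finset.subset_union_left).trans hsubf, ?_⟩
      intro d' hd' hstep'
      rcases List.mem_cons.1 hd' with rfl | hd'
      · refine Finset.mem_union_right _ (hsubf (Finset.mem_union_right _ hCn.1))
      · exact hhandf d' hd' hstep'
    · rw [if_neg hg]
      obtain ⟨M', hfold, hpartf, hsubf, hhandf⟩ := ih hL' st M hst1 hst2 hpart
      refine ⟨M', hfold, hpartf, hsubf, ?_⟩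
      intro d' hd' hstep'
      rcases List.mem_cons.1 hd' with rfl | hd'
      · obtain ⟨_, hland, hnW⟩ := hstep'
        have hin : (x + d'.1, y + d'.2) ∈ st.1 := by
          by_contra hnin
          exact hg ⟨⟨hland.1, hland.2.1, hland.2.2.1, hland.2.2.2.1⟩, hnin, hland.2.2.2.2⟩
        rcases Finset.mem_union.1 (hst1 ▸ hin) with h | h
        · exact Finset.mem_union_left _ h
        · exact Finset.mem_union_right _ (hsubf h)
      · exact hhandf d' hd' hstep'

theorem dfs_run (g : List (List Char)) (rl cl : Int) :
    ∀ (fuel : Nat) (x y : Int) (W : Finset (Int × Int)),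
      Land g rl cl (x, y) → (x, y) ∉ W → ((Box rl cl) \ W).card < fuel →
      ∃ M, dfsB g rl cl fuel x y W = (W ∪ M, ∑ a ∈ M, valAt g a) ∧
        CompSet g rl cl W (x, y) M := by
  intro fuel
  induction fuel with
  | zero => intro x y W _ _ h; exact absurd h (Nat.not_lt_zero _)
  | succ fuel ih =>
    intro x y W hland hW hcard
    obtain ⟨M', hfold, hpart, hsub, hhand⟩ :=
      dfs_fold g rl cl fuel ih W x y hland hW hcard pvDirs (fun d hd => hd)
        (insert (x, y) W, digitVal (cellAt g x y)) {(x, y)}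
        (by rw [Finset.insert_eq, Finset.union_comm])
        (by rw [Finset.sum_singleton]; rfl)
        ⟨Finset.mem_singleton_self _,
          (by intro a ha; rcases Finset.mem_singleton.1 ha with rfl; exact hW),
          (by intro a ha; rcases Finset.mem_singleton.1 ha with rfl; exact Relation.ReflTransGen.refl),
          (by intro a ha; rcases Finset.mem_singleton.1 ha with rfl; exact hland),
          (by intro a ha hne; rcases Finset.mem_singleton.1 ha with rfl; exact absurd rfl hne)⟩
    refine ⟨M', ?_, hpart.1, hpart.2.1, hpart.2.2.1, hpart.2.2.2.1, ?_⟩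
    · exact hfold
    · intro a ha b hstep
      by_cases hne : a = (x, y)
      · subst hne
        obtain ⟨⟨d, hd, hb⟩, hlandb, hbW⟩ := hstep
        subst hb
        rcases Finset.mem_union.1 (hhand d hd ⟨⟨d, hd, rfl⟩, hlandb, hbW⟩) with h | h
        · exact absurd h hbW
        · exact h
      · exact hpart.2.2.2.2 a ha hne b hstep

theorem cell_eq (g : List (List Char)) (rl cl i j : Int) (vis : Finset (Int × Int))
    (hi : 0 ≤ i) (hi' : i < rl) (hj : 0 ≤ j) (hj' : j < cl)
    (hX : cellAt g i j ≠ 'X') (hv : (i, j) ∉ vis) :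
    bfsA g rl cl (2 * (rl * cl).toNat + 2) [(i, j)] (insert (i, j) vis) =
      dfsB g rl cl ((rl * cl).toNat + 1) i j vis := by
  have hland : Land g rl cl (i, j) := ⟨hi, hi', hj, hj', hX⟩
  have htn : (rl * cl).toNat = rl.toNat * cl.toNat :=
    Int.toNat_mul (hi.trans hi'.le) (hj.trans hj'.le)
  have hIbfs : BfsInv g rl cl vis (i, j) [] [(i, j)] (insert (i, j) vis)
      (digitVal (cellAt g i j)) := by
    refine ⟨Finset.subset_insert _ _, Finset.mem_insert_self _ _, hv, ?_, ?_, ?_, ?_, ?_⟩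
    · intro a ha
      rcases List.mem_singleton.1 ha with rfl
      exact ⟨Finset.mem_insert_self _ _, hv⟩
    · intro a ha hav
      rcases Finset.mem_insert.1 ha with rfl | ha
      · exact Relation.ReflTransGen.refl
      · exact absurd ha hav
    · intro a ha hav
      rcases Finset.mem_insert.1 ha with rfl | ha
      · exact hland
      · exact absurd ha hav
    · rw [Finset.insert_sdiff_of_notMem _ hv, Finset.sdiff_self]
      simp [valAt]
    · intro a ha hav b hstep
      rcases Finset.mem_insert.1 ha with rfl | ha
      · exact Or.inr (Or.inl (List.mem_singleton_self _))
      · exact absurd ha hav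
  have hcard1 : ((Box rl cl) \ insert (i, j) vis).card ≤ (Box rl cl).card :=
    Finset.card_le_card (Finset.sdiff_subset)
  have hcard2 : ((Box rl cl) \ vis).card ≤ (Box rl cl).card :=
    Finset.card_le_card (Finset.sdiff_subset)
  have hboxcard := card_box rl cl
  obtain ⟨M1, hA, hC1⟩ := bfs_run g rl cl vis (i, j) (2 * (rl * cl).toNat + 2)
    [(i, j)] (insert (i, j) vis) (digitVal (cellAt g i j)) hIbfs
    (by simp only [List.length_cons, List.length_nil]; omega)
  obtain ⟨M2, hB, hC2⟩ := dfs_run g rl cl ((rl * cl).toNat + 1) i j vis hland hv (by omega)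
  have hM : M1 = M2 := compset_unique g rl cl vis (i, j) M1 M2 hC1 hC2
  show bfsLoop g rl cl (2 * (rl * cl).toNat + 2) [(i, j)] (insert (i, j) vis)
      (digitVal (cellAt g ((([(i, j)] : List (Int × Int)).headD (0, 0)).1)
        ((([(i, j)] : List (Int × Int)).headD (0, 0)).2))) = _
  rw [List.headD_cons]
  show bfsLoop g rl cl (2 * (rl * cl).toNat + 2) [(i, j)] (insert (i, j) vis)
      (digitVal (cellAt g i j)) = _
  rw [hA, hB, hM]

theorem outer_eq (g : List (List Char)) (rl cl : Int) (st0 : Finset (Int × Int) × List Int) :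
    (PySem.List.pyRange 0 rl 1).foldl (fun st i =>
      (PySem.List.pyRange 0 cl 1).foldl
        (fun (st : Finset (Int × Int) × List Int) j =>
          if cellAt g i j ≠ 'X' ∧ (i, j) ∉ st.1 then
            let r := bfsA g rl cl (2 * (rl * cl).toNat + 2) [(i, j)] (insert (i, j) st.1)
            (r.1, st.2 ++ [r.2])
          else st) st) st0 =
    (PySem.List.pyRange 0 rl 1).foldl (fun st i =>
      (PySem.List.pyRange 0 cl 1).foldl
        (fun (st : Finset (Int × Int) × List Int) j =>
          if cellAt g i j ≠ 'X' ∧ (i, j) ∉ st.1 then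
            let r := dfsB g rl cl ((rl * cl).toNat + 1) i j st.1
            (r.1, st.2 ++ [r.2])
          else st) st) st0 := by
  apply PySem.List.foldl_congr_mem
  intro st i hi
  apply PySem.List.foldl_congr_mem
  intro st' j hj
  rw [PySem.List.mem_pyRange_one] at hi hj
  by_cases hg : cellAt g i j ≠ 'X' ∧ (i, j) ∉ st'.1
  · rw [if_pos hg, if_pos hg]
    show ((bfsA g rl cl (2 * (rl * cl).toNat + 2) [(i, j)] (insert (i, j) st'.1)).1,
        st'.2 ++ [(bfsA g rl cl (2 * (rl * cl).toNat + 2) [(i, j)] (insert (i, j) st'.1)).2]) =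
      ((dfsB g rl cl ((rl * cl).toNat + 1) i j st'.1).1,
        st'.2 ++ [(dfsB g rl cl ((rl * cl).toNat + 1) i j st'.1).2])
    rw [cell_eq g rl cl i j st'.1 hi.1 hi.2 hj.1 hj.2 hg.1 hg.2]
  · rw [if_neg hg, if_neg hg]

theorem final_if_eq (l : List Int) :
    (if l.length = 0 then ([-1] : List Int) else PySem.List.sorted l (fun x => x) false) =
      (if l = [] then [-1] else PySem.List.sorted l (fun x => x) false) := by
  cases l <;> simp

theorem main_eq (maps : List String) : solution maps = solution_alt maps := by
  simp only [solution, solution_alt]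
  rw [outer_eq]
  exact final_if_eq _

-- ===== VERDICT (by name: the statement is the Claim_ definition above) =====
theorem solution_spec : Claim_equal_solution := by
  intro maps _ _
  unfold Spec_solution
  exact main_eq maps
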